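-- pv_equiv track=rewrite | github.com/leslierere/leetcode_with_python | not_in_lc/amazon/SubstringSizeK.py | uniqueSubstringSizeK
-- ===== SOURCE A (Python) =====
-- import collections
--
-- def uniqueSubstringSizeK(s, k):
--     counter = collections.Counter(s[:k-1])
--     result = set()
--
--     for i in range(k-1, len(s)):
--         char = s[i]
--         counter[char] += 1
--         if len(counter) == k:
--             result.add(s[i-k+1:i+1])
--         first_char = s[i-k+1]
--         if counter[first_char] == 1:
--             counter.pop(first_char)
--         else:
--             counter[first_char] -= 1
--
--     return list(result)
-- ===== SOURCE B (Python) =====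
-- def uniqueSubstringSizeK(s, k):
--     result = set()
--     for i in range(len(s) - k + 1):
--         w = s[i:i+k]
--         if len(set(w)) == k:
--             result.add(w)
--     return list(result)
-- ===== Notes on version B (the rewrite author's own statement) =====
-- stated objective: simpler
-- what changed: Replaces the sliding Counter with its incremental add/decrement/pop bookkeeping by a direct per-window check: for each window start take the k-slice and test len(set(window)) == k.
import Mathlib
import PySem

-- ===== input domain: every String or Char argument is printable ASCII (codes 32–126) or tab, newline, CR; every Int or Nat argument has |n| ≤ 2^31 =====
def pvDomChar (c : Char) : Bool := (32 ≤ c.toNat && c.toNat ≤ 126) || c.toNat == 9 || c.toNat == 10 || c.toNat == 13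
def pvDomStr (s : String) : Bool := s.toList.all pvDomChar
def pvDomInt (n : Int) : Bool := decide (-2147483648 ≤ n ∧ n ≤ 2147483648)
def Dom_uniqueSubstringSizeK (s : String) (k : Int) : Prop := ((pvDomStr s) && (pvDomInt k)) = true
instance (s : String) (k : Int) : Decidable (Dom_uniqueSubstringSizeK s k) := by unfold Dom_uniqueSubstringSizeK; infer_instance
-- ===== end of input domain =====

-- B replaces the sliding Counter with a direct per-window distinctness test; objective: simpler.


-- ===== PORT A =====
def uniqueSubstringSizeK (s : String) (k : Int) : List String :=
  let cs := s.toList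
  let counter0 : PySem.Dict Char Int := PySem.Dict.counter (PySem.List.slice cs none (some (k - 1)))
  let st :=
    (PySem.List.pyRange (k - 1) (cs.length : Int) 1).foldl
      (fun st i =>
        match PySem.List.pyGet? cs i with
        | none => st          -- Python raises IndexError here; excluded by Pre_
        | some c =>
          let counter := st.1.modify c 0 (· + 1)
          let result :=
            if (counter.size : Int) == k then
              PySem.Set.add st.2 (String.ofList (PySem.List.slice cs (some (i - k + 1)) (some (i + 1))))
            else st.2
          match PySem.List.pyGet? cs (i - k + 1) with
          | none => (counter, result)   -- Python raises IndexError here; excluded by Pre_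
          | some firstChar =>
            if counter.getD firstChar 0 == 1 then (counter.erase firstChar, result)
            else (counter.modify firstChar 0 (· - 1), result))
      (counter0, (PySem.Set.empty : PySem.Set String))
  st.2

-- ===== PORT B =====
def uniqueSubstringSizeK_alt (s : String) (k : Int) : List String :=
  let cs := s.toList
  (PySem.List.pyRange 0 ((cs.length : Int) - k + 1) 1).foldl
    (fun result i =>
      let w := PySem.List.slice cs (some i) (some (i + k))
      if ((PySem.Set.ofList w).length : Int) == k then PySem.Set.add result (String.ofList w)
      else result)
    (PySem.Set.empty : PySem.Set String)

-- ===== PRECONDITION & SPEC =====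
-- Pre_: exactly the inputs on which the Python A returns (for every k <= 0 the loop indexes s out of range and raises IndexError)
def Pre_uniqueSubstringSizeK (s : String) (k : Int) : Prop := 1 ≤ k
instance (s : String) (k : Int) : Decidable (Pre_uniqueSubstringSizeK s k) := by unfold Pre_uniqueSubstringSizeK; infer_instance
def pvWitness_uniqueSubstringSizeK : String × Int := ("abcabc", 3)

def Spec_uniqueSubstringSizeK (s : String) (k : Int) (out : List String) : Prop := out = uniqueSubstringSizeK_alt s k
instance (s : String) (k : Int) (out : List String) : Decidable (Spec_uniqueSubstringSizeK s k out) := by unfold Spec_uniqueSubstringSizeK; infer_instance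

-- ===== CLAIM (what is proved, stated in full; the proofs are below) =====
def Claim_equal_uniqueSubstringSizeK : Prop := ∀ (s : String) (k : Int), Dom_uniqueSubstringSizeK s k → Pre_uniqueSubstringSizeK s k → Spec_uniqueSubstringSizeK s k (uniqueSubstringSizeK s k)

-- ===== LEMMAS AND PROOFS =====

-- the two loop bodies, named for the proofs (definitionally the lambdas of the ports)
def pvStepA (cs : List Char) (k : Int) (st : PySem.Dict Char Int × PySem.Set String) (i : Int) :
    PySem.Dict Char Int × PySem.Set String :=
  match PySem.List.pyGet? cs i with
  | none => st
  | some c =>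
    let counter := st.1.modify c 0 (· + 1)
    let result :=
      if (counter.size : Int) == k then
        PySem.Set.add st.2 (String.ofList (PySem.List.slice cs (some (i - k + 1)) (some (i + 1))))
      else st.2
    match PySem.List.pyGet? cs (i - k + 1) with
    | none => (counter, result)
    | some firstChar =>
      if counter.getD firstChar 0 == 1 then (counter.erase firstChar, result)
      else (counter.modify firstChar 0 (· - 1), result)

def pvStepB (cs : List Char) (k : Int) (result : PySem.Set String) (i : Int) : PySem.Set String :=
  let w := PySem.List.slice cs (some i) (some (i + k))
  if ((PySem.Set.ofList w).length : Int) == k then PySem.Set.add result (String.ofList w)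
  else result

theorem pvA_eq_foldl (s : String) (k : Int) :
    uniqueSubstringSizeK s k =
      ((PySem.List.pyRange (k - 1) (s.toList.length : Int) 1).foldl (pvStepA s.toList k)
        (PySem.Dict.counter (PySem.List.slice s.toList none (some (k - 1))),
         (PySem.Set.empty : PySem.Set String))).2 := rfl

theorem pvB_eq_foldl (s : String) (k : Int) :
    uniqueSubstringSizeK_alt s k =
      (PySem.List.pyRange 0 ((s.toList.length : Int) - k + 1) 1).foldl (pvStepB s.toList k)
        (PySem.Set.empty : PySem.Set String) := rfl

-- the loop invariant of A's counter: it is exactly the multiset of the current (k-1)-prefix window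
def pvInv (d : PySem.Dict Char Int) (l : List Char) : Prop :=
  d.keys.Nodup ∧ (∀ c : Char, d.getD c 0 = (l.count c : Int)) ∧
    (∀ c : Char, d.contains c = true → c ∈ l)

-- facts about Dict.erase (no library lemmas exist for erase)
theorem pvGet?_erase_self {κ ν : Type} [BEq κ] [LawfulBEq κ] (d : PySem.Dict κ ν) (k : κ) :
    (d.erase k).get? k = none := by
  simp only [PySem.Dict.erase, PySem.Dict.get?, Option.map_eq_none_iff, List.find?_eq_none,
    List.mem_filter]
  intro p hp
  simpa using hp.2

theorem pvFind?_filter_ne {κ ν : Type} [BEq κ] [LawfulBEq κ] (k k' : κ) (h : k' ≠ k) :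
    ∀ l : List (κ × ν),
      List.find? (fun p => p.1 == k') (l.filter (fun p => !(p.1 == k))) =
        List.find? (fun p => p.1 == k') l
  | [] => rfl
  | p :: t => by
    by_cases hpk : p.1 = k
    · have h1 : (!(p.1 == k)) = false := by simp [hpk]
      have h2 : (p.1 == k') = false := by simp [hpk, Ne.symm h]
      rw [List.filter_cons, h1]
      simp only [Bool.false_eq_true, if_false]
      rw [List.find?_cons_of_neg (by simp [h2])]
      exact pvFind?_filter_ne k k' h t
    · have h1 : (!(p.1 == k)) = true := by simp [hpk]
      rw [List.filter_cons, h1]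
      simp only [if_true]
      by_cases hpk' : p.1 = k'
      · rw [List.find?_cons_of_pos (by simp [hpk']), List.find?_cons_of_pos (by simp [hpk'])]
      · rw [List.find?_cons_of_neg (by simp [hpk']), List.find?_cons_of_neg (by simp [hpk'])]
        exact pvFind?_filter_ne k k' h t

theorem pvGet?_erase_of_ne {κ ν : Type} [BEq κ] [LawfulBEq κ] (d : PySem.Dict κ ν) (k k' : κ)
    (h : k' ≠ k) : (d.erase k).get? k' = d.get? k' := by
  simp only [PySem.Dict.erase, PySem.Dict.get?]
  rw [pvFind?_filter_ne k k' h d.items]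

theorem pvContains_erase {κ ν : Type} [BEq κ] [LawfulBEq κ] (d : PySem.Dict κ ν) (k k' : κ)
    (h : (d.erase k).contains k' = true) : k' ≠ k ∧ d.contains k' = true := by
  simp only [PySem.Dict.erase, PySem.Dict.contains, List.any_eq_true, List.mem_filter] at h ⊢
  obtain ⟨p, ⟨hp, hq⟩, he⟩ := h
  refine ⟨?_, p, hp, he⟩
  intro rfl
  rw [beq_iff_eq] at he
  simp [he] at hq

theorem pvKeys_erase_sublist {κ ν : Type} [BEq κ] (d : PySem.Dict κ ν) (k : κ) :
    (d.erase k).keys.Sublist d.keys :=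
  List.Sublist.map _ List.filter_sublist

-- len(counter) is the number of distinct characters of the counted window
theorem pvSize_eq (d : PySem.Dict Char Int) (l : List Char) (h : pvInv d l) :
    d.size = (PySem.Set.ofList l).length := by
  obtain ⟨hnd, hcount, hmemof⟩ := h
  have hsize : d.size = d.keys.length := by
    simp [PySem.Dict.size, PySem.Dict.keys]
  have hmem : ∀ c : Char, c ∈ d.keys ↔ c ∈ PySem.Set.ofList l := by
    intro c
    rw [PySem.Set.mem_ofList]
    constructor
    · intro hc
      exact hmemof c ((PySem.Dict.contains_iff_mem_keys d c).2 hc)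
    · intro hc
      by_contra hnc
      have hcf : d.contains c = false := by
        cases hcc : d.contains c
        · rfl
        · exact absurd ((PySem.Dict.contains_iff_mem_keys d c).1 hcc) hnc
      have h0 := PySem.Dict.getD_of_not_contains d (0 : Int) hcf
      rw [hcount c] at h0
      have : 0 < l.count c := List.count_pos_iff.2 hc
      omega
  have hfin : d.keys.toFinset = (PySem.Set.ofList l).toFinset := by
    ext c
    simp only [List.mem_toFinset]
    exact hmem c
  have h1 := List.toFinset_card_of_nodup hnd
  have h2 := List.toFinset_card_of_nodup (PySem.Set.nodup_ofList l)
  rw [hsize, ← h1, hfin, h2]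

-- keys stay Nodup through a modify
theorem pvNodup_keys_modify (d : PySem.Dict Char Int) (c : Char) (d0 : Int) (f : Int → Int)
    (h : d.keys.Nodup) : (d.modify c d0 f).keys.Nodup := by
  rw [PySem.Dict.keys_modify]
  by_cases hc : d.contains c = true
  · rw [PySem.Dict.keys_insert_of_contains _ _ hc]
    exact h
  · rw [PySem.Dict.keys_insert_of_not_contains _ _ (by simpa using hc)]
    refine List.Nodup.append h (List.nodup_singleton c) ?_
    intro a ha hb
    rw [List.mem_singleton] at hb
    subst hb
    exact hc ((PySem.Dict.contains_iff_mem_keys d a).2 ha)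

-- ONE loop step: the counter invariant advances by one window, and the result
-- component receives exactly B's update for the same window start t
theorem pvStep_main (cs : List Char) (kn t : Nat) (hkn : 1 ≤ kn) (hlen : t + kn ≤ cs.length)
    (d : PySem.Dict Char Int) (r : PySem.Set String)
    (hInv : pvInv d ((cs.drop t).take (kn - 1))) :
    pvInv (pvStepA cs (kn : Int) (d, r) ((kn : Int) - 1 + (t : Int))).1
        ((cs.drop (t + 1)).take (kn - 1)) ∧
      (pvStepA cs (kn : Int) (d, r) ((kn : Int) - 1 + (t : Int))).2 =
        pvStepB cs (kn : Int) r (0 + (t : Int)) := by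
  obtain ⟨hnd, hcnt, hmem⟩ := hInv
  have hidx : t + (kn - 1) < cs.length := by omega
  have htlt : t < cs.length := by omega
  have hi : ((kn : Int) - 1 + (t : Int)) = ((t + (kn - 1) : Nat) : Int) := by omega
  have hget1 : PySem.List.pyGet? cs ((kn : Int) - 1 + (t : Int)) = some cs[t + (kn - 1)] := by
    rw [hi, PySem.List.pyGet?_natCast, List.getElem?_eq_getElem hidx]
  have hi2 : ((kn : Int) - 1 + (t : Int)) - (kn : Int) + 1 = (t : Int) := by omega
  have hget2 : PySem.List.pyGet? cs (((kn : Int) - 1 + (t : Int)) - (kn : Int) + 1)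
      = some cs[t] := by
    rw [hi2, PySem.List.pyGet?_natCast, List.getElem?_eq_getElem htlt]
  have hwapp : (cs.drop t).take kn = (cs.drop t).take (kn - 1) ++ [cs[t + (kn - 1)]] := by
    conv_lhs => rw [show kn = (kn - 1) + 1 by omega]
    rw [List.take_add_one, List.getElem?_drop, List.getElem?_eq_getElem hidx]
    rfl
  have hwcons : (cs.drop t).take kn = cs[t] :: (cs.drop (t + 1)).take (kn - 1) := by
    conv_lhs => rw [List.drop_eq_getElem_cons htlt, show kn = (kn - 1) + 1 by omega]
    rw [List.take_succ_cons]
  have hInv' : pvInv (d.modify cs[t + (kn - 1)] 0 (· + 1)) ((cs.drop t).take kn) := by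
    refine ⟨pvNodup_keys_modify d _ 0 _ hnd, ?_, ?_⟩
    · intro c'
      rw [PySem.Dict.getD_modify]
      by_cases hc' : c' = cs[t + (kn - 1)]
      · rw [if_pos hc', hcnt _, hwapp, hc', List.count_append]
        push_cast
        simp
      · rw [if_neg hc', hcnt c', hwapp, List.count_append]
        have : List.count c' [cs[t + (kn - 1)]] = 0 := by
          simp [List.count_singleton]
          exact fun h => hc' h.symm
        rw [this]
        push_cast
        ring
    · intro c' hc'
      rw [PySem.Dict.contains_modify] at hc'
      rw [hwapp]
      rcases Bool.or_eq_true_iff.1 hc' with h1 | h1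
      · rw [beq_iff_eq] at h1
        subst h1
        simp
      · exact List.mem_append_left _ (hmem c' h1)
  have hsize : ((d.modify cs[t + (kn - 1)] 0 (· + 1)).size : Int)
      = ((PySem.Set.ofList ((cs.drop t).take kn)).length : Int) := by
    rw [pvSize_eq _ _ hInv']
  have hsliceA : PySem.List.slice cs (some (((kn : Int) - 1 + (t : Int)) - (kn : Int) + 1))
      (some ((kn : Int) - 1 + (t : Int) + 1)) = (cs.drop t).take kn := by
    rw [hi2, show (kn : Int) - 1 + (t : Int) + 1 = ((t + kn : Nat) : Int) by omega,
      PySem.List.slice_toNat _ (by positivity) (by positivity)]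
    simp only [Int.toNat_natCast]
    rw [show t + kn - t = kn by omega]
  have hsliceB : PySem.List.slice cs (some (0 + (t : Int))) (some (0 + (t : Int) + (kn : Int)))
      = (cs.drop t).take kn := by
    rw [show (0 + (t : Int)) = ((t : Nat) : Int) by omega,
      show ((t : Nat) : Int) + (kn : Int) = ((t + kn : Nat) : Int) by omega,
      PySem.List.slice_toNat _ (by positivity) (by positivity)]
    simp only [Int.toNat_natCast]
    rw [show t + kn - t = kn by omega]
  have hcount : ((cs.drop t).take kn).count cs[t] = ((cs.drop (t + 1)).take (kn - 1)).count cs[t] + 1 := by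
    rw [hwcons, List.count_cons_self]
  simp only [pvStepA, pvStepB, hget1, hget2, hsliceA, hsliceB, hsize]
  constructor
  · -- the counter component keeps the invariant for the shifted window
    by_cases hone : ((cs.drop t).take kn).count cs[t] = 1
    · have hbr : ((d.modify cs[t + (kn - 1)] 0 (· + 1)).getD cs[t] 0 == (1 : Int)) = true := by
        rw [hInv'.2.1 cs[t], beq_iff_eq]
        exact_mod_cast hone
      rw [if_pos hbr]
      refine ⟨List.Nodup.sublist (pvKeys_erase_sublist _ cs[t]) hInv'.1, ?_, ?_⟩
      · intro c'
        by_cases hc' : c' = cs[t]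
        · subst hc'
          rw [PySem.Dict.getD_eq_get?_getD, pvGet?_erase_self]
          have : ((cs.drop (t + 1)).take (kn - 1)).count cs[t] = 0 := by omega
          rw [this]
          rfl
        · rw [PySem.Dict.getD_eq_get?_getD, pvGet?_erase_of_ne _ _ _ hc',
            ← PySem.Dict.getD_eq_get?_getD, hInv'.2.1 c', hwcons,
            List.count_cons_of_ne (Ne.symm hc')]
      · intro c' hc'
        obtain ⟨hne, hcont⟩ := pvContains_erase _ _ _ hc'
        have := hInv'.2.2 c' hcont
        rw [hwcons] at this
        rcases List.mem_cons.1 this with h2 | h2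
        · exact absurd h2 hne
        · exact h2
    · have hbr : ((d.modify cs[t + (kn - 1)] 0 (· + 1)).getD cs[t] 0 == (1 : Int)) = false := by
        rw [hInv'.2.1 cs[t], beq_eq_false_iff_ne]
        intro h
        exact hone (by exact_mod_cast h)
      rw [if_neg (by simp [hbr])]
      have hmemtl : cs[t] ∈ (cs.drop (t + 1)).take (kn - 1) := by
        have h1 : cs[t] ∈ (cs.drop t).take kn := by rw [hwcons]; exact List.mem_cons_self
        have h2 : 0 < ((cs.drop t).take kn).count cs[t] := List.count_pos_iff.2 h1
        exact List.count_pos_iff.1 (by omega)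
      refine ⟨pvNodup_keys_modify _ _ 0 _ hInv'.1, ?_, ?_⟩
      · intro c'
        rw [PySem.Dict.getD_modify]
        by_cases hc' : c' = cs[t]
        · rw [if_pos hc', hInv'.2.1 cs[t], hc']
          rw [show (((cs.drop t).take kn).count cs[t] : Int) - 1
              = (((cs.drop (t + 1)).take (kn - 1)).count cs[t] : Int) by omega]
        · rw [if_neg hc', hInv'.2.1 c', hwcons, List.count_cons_of_ne (Ne.symm hc')]
      · intro c' hc'
        rw [PySem.Dict.contains_modify] at hc'
        rcases Bool.or_eq_true_iff.1 hc' with h1 | h1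
        · rw [beq_iff_eq] at h1
          subst h1
          exact hmemtl
        · have := hInv'.2.2 c' h1
          rw [hwcons] at this
          rcases List.mem_cons.1 this with h2 | h2
          · subst h2; exact hmemtl
          · exact h2
  · -- the result component is exactly B's update
    by_cases hsz : (((PySem.Set.ofList ((cs.drop t).take kn)).length : Int) == (kn : Int)) = true
    · rw [if_pos hsz]
      split <;> rfl
    · rw [if_neg hsz]
      split <;> rfl

-- the fold over the common range: equal result sets, invariant carried along
theorem pvLoop (cs : List Char) (kn : Nat) (hkn : 1 ≤ kn) (b : Nat) :
    ∀ (a : Nat) (d : PySem.Dict Char Int) (r : PySem.Set String),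
      a + b + kn ≤ cs.length + 1 →
      pvInv d ((cs.drop a).take (kn - 1)) →
      ((List.range' a b).foldl
          (fun st (u : Nat) => pvStepA cs (kn : Int) st ((kn : Int) - 1 + (u : Int))) (d, r)).2 =
        (List.range' a b).foldl (fun rr (u : Nat) => pvStepB cs (kn : Int) rr (0 + (u : Int))) r := by
  induction b with
  | zero => intro a d r _ _; rfl
  | succ b ih =>
    intro a d r hle hInv
    rw [List.range'_succ, List.foldl_cons, List.foldl_cons]
    obtain ⟨h1, h2⟩ := pvStep_main cs kn a hkn (by omega) d r hInv
    have hpair : pvStepA cs (kn : Int) (d, r) ((kn : Int) - 1 + (a : Int)) =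
        ((pvStepA cs (kn : Int) (d, r) ((kn : Int) - 1 + (a : Int))).1,
         pvStepB cs (kn : Int) r (0 + (a : Int))) := by
      rw [← h2]
    rw [hpair]
    exact ih (a + 1) _ _ (by omega) h1

-- ===== VERDICT (by name: the statement is the Claim_ definition above) =====
theorem uniqueSubstringSizeK_spec : Claim_equal_uniqueSubstringSizeK := by
  intro s k _ hpre
  unfold Pre_uniqueSubstringSizeK at hpre
  unfold Spec_uniqueSubstringSizeK
  obtain ⟨kn, rfl⟩ : ∃ kn : Nat, k = (kn : Int) := ⟨k.toNat, by omega⟩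
  have hkn : 1 ≤ kn := by exact_mod_cast hpre
  rw [pvA_eq_foldl, pvB_eq_foldl]
  have hslice : PySem.List.slice s.toList none (some ((kn : Int) - 1)) =
      (s.toList.drop 0).take (kn - 1) := by
    rw [show ((kn : Int) - 1) = ((kn - 1 : Nat) : Int) by omega,
      PySem.List.slice_to_natCast, List.drop_zero]
  have hInv0 : pvInv (PySem.Dict.counter (PySem.List.slice s.toList none (some ((kn : Int) - 1))))
      ((s.toList.drop 0).take (kn - 1)) := by
    rw [hslice]
    refine ⟨PySem.Dict.nodup_keys_counter _, ?_, ?_⟩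
    · intro c; exact PySem.Dict.getD_counter _ c
    · intro c hc
      rw [PySem.Dict.contains_counter] at hc
      exact List.contains_iff_mem.1 hc
  rw [PySem.List.pyRange_one, PySem.List.pyRange_one, List.foldl_map, List.foldl_map]
  have hmeq : ((s.toList.length : Int) - ((kn : Int) - 1)).toNat =
      ((s.toList.length : Int) - (kn : Int) + 1 - 0).toNat := by omega
  rw [hmeq]
  set m := ((s.toList.length : Int) - (kn : Int) + 1 - 0).toNat with hm
  by_cases hbig : m + kn ≤ s.toList.length + 1
  · rw [List.range_eq_range']
    have := pvLoop s.toList kn hkn m 0 _ PySem.Set.empty (by omega) hInv0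
    simpa using this
  · have hm0 : m = 0 := by omega
    rw [hm0]
    rfl
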